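-- pv_equiv track=rewrite | github.com/sinramyeon/ME-TIL | Algo_puzzle/2.py | celebrityDensity
-- ===== SOURCE A (Python) =====
-- def celebrityDensity(sched, start, end):
--     count = [0] * (end+1)
--     # 시간 순회
--     for i in range(start, end+1):
--         count[i] = 0
--         for c in sched:
--             # 시간이 연예인이 있는 시간 내여야 함
--             if c[0] <= i and c[1] >i:
--                 count[i] += 1
--     return count
-- ===== SOURCE B (Python) =====
-- def celebrityDensity(sched, start, end):
--     # difference array / sweep: mark interval endpoints, then prefix-sum once
--     count = [0] * (end + 1)
--     lo = max(start, 0)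
--     if lo > end:
--         return count
--     diff = [0] * (end + 2)
--     for c in sched:
--         l = max(c[0], lo)
--         r = min(c[1], end + 1)
--         if l < r:
--             diff[l] += 1
--             diff[r] -= 1
--     run = 0
--     for i in range(lo, end + 1):
--         run += diff[i]
--         count[i] = run
--     return count
-- ===== Notes on version B (the rewrite author's own statement) =====
-- stated objective: faster
-- what changed: Replaced the per-time-slot rescan of the whole schedule with a difference array: each interval marks its clipped endpoints once and a single prefix-sum pass produces all counts.
-- outside the precondition, e.g. on celebrityDensity([[6]], 2, 4): A returns [0, 0, 0, 0, 0], B raises IndexError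
import Mathlib
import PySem

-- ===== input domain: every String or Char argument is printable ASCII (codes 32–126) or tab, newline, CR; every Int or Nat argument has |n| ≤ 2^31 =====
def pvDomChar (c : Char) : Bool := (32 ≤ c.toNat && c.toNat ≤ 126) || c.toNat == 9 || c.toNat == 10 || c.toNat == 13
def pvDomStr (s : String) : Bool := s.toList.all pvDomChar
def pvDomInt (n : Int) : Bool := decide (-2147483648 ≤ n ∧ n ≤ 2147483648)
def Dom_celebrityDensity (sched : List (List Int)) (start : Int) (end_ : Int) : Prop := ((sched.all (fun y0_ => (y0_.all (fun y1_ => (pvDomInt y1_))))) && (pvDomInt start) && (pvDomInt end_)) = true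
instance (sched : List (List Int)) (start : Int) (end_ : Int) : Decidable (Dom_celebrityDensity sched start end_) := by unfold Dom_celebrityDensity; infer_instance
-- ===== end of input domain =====

-- B replaces A's per-time rescan of the schedule by a difference array with one prefix-sum pass (measured asymptotically faster).


-- ===== PORT A =====
def celebrityDensity (sched : List (List Int)) (start : Int) (end_ : Int) : List Int :=
  -- count = [0] * (end+1)
  let count := PySem.List.pyRepeat [(0 : Int)] (end_ + 1)
  -- for i in range(start, end+1): count[i] = 0; for c in sched: if c[0] <= i and c[1] > i: count[i] += 1
  (PySem.List.pyRange start (end_ + 1) 1).foldl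
    (fun count i =>
      let count := PySem.List.pySetD count i 0
      sched.foldl
        (fun count c =>
          if PySem.List.pyGetD c 0 0 ≤ i ∧ i < PySem.List.pyGetD c 1 0 then
            PySem.List.pySetD count i (PySem.List.pyGetD count i 0 + 1)
          else count)
        count)
    count

-- ===== PORT B =====
def celebrityDensity_alt (sched : List (List Int)) (start : Int) (end_ : Int) : List Int :=
  let count := PySem.List.pyRepeat [(0 : Int)] (end_ + 1)
  let lo := max start 0
  if lo > end_ then count
  else
    -- diff = [0]*(end+2); for c in sched: l=max(c[0],lo); r=min(c[1],end+1); if l<r: diff[l]+=1; diff[r]-=1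
    let diff := sched.foldl
      (fun diff c =>
        let l := max (PySem.List.pyGetD c 0 0) lo
        let r := min (PySem.List.pyGetD c 1 0) (end_ + 1)
        if l < r then
          let diff := PySem.List.pySetD diff l (PySem.List.pyGetD diff l 0 + 1)
          PySem.List.pySetD diff r (PySem.List.pyGetD diff r 0 - 1)
        else diff)
      (PySem.List.pyRepeat [(0 : Int)] (end_ + 2))
    -- run = 0; for i in range(lo, end+1): run += diff[i]; count[i] = run
    ((PySem.List.pyRange lo (end_ + 1) 1).foldl
      (fun (st : List Int × Int) i =>
        let run := st.2 + PySem.List.pyGetD diff i 0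
        (PySem.List.pySetD st.1 i run, run))
      (count, 0)).1

-- ===== PRECONDITION & SPEC =====
-- Pre_ excludes (a) inputs where A raises IndexError (a time index or an interval access out of range) and
-- (b) schedule entries shorter than 2, on which A may still return thanks to `and` short-circuiting
-- (c[1] untouched when c[0] > every scanned time) while B's unconditional c[1] access raises.
def Pre_celebrityDensity (sched : List (List Int)) (start : Int) (end_ : Int) : Prop :=
  start ≤ end_ → (0 ≤ start + end_ + 1 ∧ ∀ c ∈ sched, 2 ≤ c.length)
instance (sched : List (List Int)) (start : Int) (end_ : Int) : Decidable (Pre_celebrityDensity sched start end_) := by unfold Pre_celebrityDensity; infer_instance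
def pvWitness_celebrityDensity : List (List Int) × Int × Int := ([[1, 3], [2, 5]], -1, 4)

def Spec_celebrityDensity (sched : List (List Int)) (start : Int) (end_ : Int) (out : List Int) : Prop := out = celebrityDensity_alt sched start end_
instance (sched : List (List Int)) (start : Int) (end_ : Int) (out : List Int) : Decidable (Spec_celebrityDensity sched start end_ out) := by unfold Spec_celebrityDensity; infer_instance

-- ===== CLAIM (what is proved, stated in full; the proofs are below) =====
def Claim_equal_celebrityDensity : Prop := ∀ (sched : List (List Int)) (start : Int) (end_ : Int), Dom_celebrityDensity sched start end_ → Pre_celebrityDensity sched start end_ → Spec_celebrityDensity sched start end_ (celebrityDensity sched start end_)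

-- ===== LEMMAS AND PROOFS =====

-- the density at time i: number of intervals of sched containing i
def pvF (sched : List (List Int)) (i : Int) : Int :=
  (sched.countP (fun c => decide (PySem.List.pyGetD c 0 0 ≤ i ∧ i < PySem.List.pyGetD c 1 0)) : Int)

-- partial sums of the difference array: pvS diff s m = sum of diff over [s, s+m)
def pvS (diff : List Int) (s m : Nat) : Int :=
  ((List.range' s m).map (fun k => diff.getD k 0)).sum

theorem pv_take_set (l : List Int) (a : Nat) (v : Int) (h : a < l.length) :
    (l.set a v).take (a+1) = l.take a ++ [v] := by
  rw [List.take_set, List.take_add_one, List.getElem?_eq_getElem (by omega)]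
  rw [List.set_append]
  simp [Nat.min_eq_left (Nat.le_of_lt h)]

-- ----- A side -----

-- A's inner loop over sched, started on count.set k v, just adds the density to slot k
theorem pv_innerA (sched : List (List Int)) (count : List Int) (k : Nat) (hk : k < count.length) (v : Int) :
    sched.foldl
        (fun count c =>
          if PySem.List.pyGetD c 0 0 ≤ (k : Int) ∧ (k : Int) < PySem.List.pyGetD c 1 0 then
            PySem.List.pySetD count (k : Int) (PySem.List.pyGetD count (k : Int) 0 + 1)
          else count)
        (count.set k v)
      = count.set k (v + pvF sched k) := by
  induction sched generalizing v with
  | nil => simp [pvF]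
  | cons c t ih =>
    simp only [List.foldl_cons]
    by_cases h : PySem.List.pyGetD c 0 0 ≤ (k : Int) ∧ (k : Int) < PySem.List.pyGetD c 1 0
    · rw [if_pos h]
      rw [PySem.List.pySetD_natCast, PySem.List.pyGetD_natCast, List.set_set]
      have : (count.set k v).getD k 0 = v := by simp [List.getD, hk]
      rw [this, ih (v + 1)]
      congr 1
      simp [pvF, h]
      ring
    · rw [if_neg h, ih v]
      congr 1
      simp [pvF, h]

-- A's outer step writes the density of time a into slot a
theorem pv_stepA (sched : List (List Int)) (count : List Int) (a : Nat) (ha : a < count.length) :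
    (sched.foldl
        (fun count c =>
          if PySem.List.pyGetD c 0 0 ≤ (a : Int) ∧ (a : Int) < PySem.List.pyGetD c 1 0 then
            PySem.List.pySetD count (a : Int) (PySem.List.pyGetD count (a : Int) 0 + 1)
          else count)
        (PySem.List.pySetD count (a : Int) 0))
      = count.set a (pvF sched a) := by
  rw [PySem.List.pySetD_natCast, pv_innerA sched count a ha 0, zero_add]

-- A's outer loop over a nonnegative index range rewrites exactly the visited slots
theorem pv_outerA (sched : List (List Int)) (m : Nat) : ∀ (a : Nat) (count : List Int), a + m ≤ count.length →
    ((PySem.List.pyRange (a : Int) ((a : Int) + (m : Int)) 1).foldl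
        (fun count i =>
          sched.foldl
            (fun count c =>
              if PySem.List.pyGetD c 0 0 ≤ i ∧ i < PySem.List.pyGetD c 1 0 then
                PySem.List.pySetD count i (PySem.List.pyGetD count i 0 + 1)
              else count)
            (PySem.List.pySetD count i 0))
        count)
      = count.take a ++ (List.range' a m).map (fun k : Nat => pvF sched (k : Int)) ++ count.drop (a + m) := by
  induction m with
  | zero =>
    intro a count h
    simp [PySem.List.pyRange_one_eq_nil]
  | succ m ih =>
    intro a count h
    have hcons : PySem.List.pyRange (a : Int) ((a : Int) + ((m : Int) + 1)) 1
        = (a : Int) :: PySem.List.pyRange ((a : Int) + 1) ((a : Int) + ((m : Int) + 1)) 1 :=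
      PySem.List.pyRange_one_cons (by omega)
    push_cast
    push_cast at hcons
    rw [hcons, List.foldl_cons, pv_stepA sched count a (by omega)]
    have hcast : ((a : Int) + 1) = ((a + 1 : Nat) : Int) := by push_cast; ring
    have hcast2 : (a : Int) + ((m : Int) + 1) = ((a + 1 : Nat) : Int) + (m : Int) := by push_cast; ring
    rw [hcast, hcast2, ih (a + 1) (count.set a (pvF sched a)) (by simp; omega)]
    rw [List.range'_succ, List.map_cons]
    rw [pv_take_set _ _ _ (by omega), List.drop_set_of_lt (by omega)]
    have hdrop : a + 1 + m = a + (m + 1) := by omega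
    rw [hdrop]
    simp

-- steps of A's outer loop preserve the length of count (inner loop)
theorem pv_lenInner (sched : List (List Int)) (i : Int) : ∀ (count : List Int),
    (sched.foldl
        (fun count c =>
          if PySem.List.pyGetD c 0 0 ≤ i ∧ i < PySem.List.pyGetD c 1 0 then
            PySem.List.pySetD count i (PySem.List.pyGetD count i 0 + 1)
          else count)
        count).length = count.length := by
  induction sched with
  | nil => intro count; rfl
  | cons c t ih =>
    intro count
    simp only [List.foldl_cons]
    rw [ih]
    split
    · exact PySem.List.length_pySetD ..
    · rfl

-- A's outer loop preserves the length of count (used for the wrapped negative-index phase)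
theorem pv_lenA (sched : List (List Int)) (r : List Int) : ∀ (count : List Int),
    ((r.foldl
        (fun count i =>
          sched.foldl
            (fun count c =>
              if PySem.List.pyGetD c 0 0 ≤ i ∧ i < PySem.List.pyGetD c 1 0 then
                PySem.List.pySetD count i (PySem.List.pyGetD count i 0 + 1)
              else count)
            (PySem.List.pySetD count i 0))
        count).length)
      = count.length := by
  induction r with
  | nil => intro count; rfl
  | cons i t ih =>
    intro count
    simp only [List.foldl_cons]
    rw [ih, pv_lenInner, PySem.List.length_pySetD]

-- ----- B side -----

-- setting one slot of the difference array shifts a window sum by the delta iff the slot is in the window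
theorem pv_sum_set (l : List Int) (p : Nat) (v : Int) (hp : p < l.length) : ∀ (m s : Nat),
    pvS (l.set p v) s m = pvS l s m + (if s ≤ p ∧ p < s + m then v - l.getD p 0 else 0) := by
  intro m
  induction m with
  | zero => intro s; simp [pvS]
  | succ m ih =>
    intro s
    simp only [pvS, List.range'_succ, List.map_cons, List.sum_cons]
    have hgd : (l.set p v).getD s 0 = if s = p then v else l.getD s 0 := by
      by_cases h : s = p
      · subst h; simp [List.getD, hp]
      · rw [List.getD, List.getElem?_set, if_neg (fun e => h e.symm), if_neg h]; rfl
    have hih := ih (s + 1)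
    simp only [pvS] at hih
    rw [hgd, hih]
    by_cases h1 : s = p
    · subst h1
      rw [if_pos rfl, if_neg (by omega), if_pos (by omega)]
      ring
    · rw [if_neg h1]
      by_cases h2 : s + 1 ≤ p ∧ p < s + 1 + m
      · rw [if_pos h2, if_pos (by omega)]; ring
      · rw [if_neg h2, if_neg (by omega)]; ring

-- building the diff array: the window sum over [lo, i] accumulates the density at i
theorem pv_diffB (sched : List (List Int)) (lo end_ : Int) (hlo : 0 ≤ lo)
    (i : Nat) (hi : lo ≤ (i : Int)) (hi2 : (i : Int) ≤ end_) :
    ∀ (diff : List Int), diff.length = (end_ + 2).toNat →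
    pvS (sched.foldl
        (fun diff c =>
          let l := max (PySem.List.pyGetD c 0 0) lo
          let r := min (PySem.List.pyGetD c 1 0) (end_ + 1)
          if l < r then
            let diff := PySem.List.pySetD diff l (PySem.List.pyGetD diff l 0 + 1)
            PySem.List.pySetD diff r (PySem.List.pyGetD diff r 0 - 1)
          else diff)
        diff) lo.toNat (i + 1 - lo.toNat)
      = pvS diff lo.toNat (i + 1 - lo.toNat) + pvF sched i := by
  induction sched with
  | nil => intro diff _; simp [pvF]
  | cons c t ih =>
    intro diff hlen
    simp only [List.foldl_cons]
    set l := max (PySem.List.pyGetD c 0 0) lo with hl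
    set r := min (PySem.List.pyGetD c 1 0) (end_ + 1) with hr
    have hpvF : pvF (c :: t) i = pvF t i + (if l ≤ (i : Int) ∧ (i : Int) < r then 1 else 0) := by
      simp only [pvF, List.countP_cons]
      have : (PySem.List.pyGetD c 0 0 ≤ (i:Int) ∧ (i:Int) < PySem.List.pyGetD c 1 0)
           ↔ (l ≤ (i : Int) ∧ (i : Int) < r) := by
        rw [hl, hr]; omega
      by_cases h : l ≤ (i : Int) ∧ (i : Int) < r
      · rw [if_pos h]; simp [this, h]
      · rw [if_neg h]; simp [this, h]
    by_cases hlr : l < r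
    · rw [if_pos hlr]
      have h0l : 0 ≤ l := le_trans hlo (le_max_right _ _)
      have h0r : 0 ≤ r := le_trans h0l (le_of_lt hlr)
      have hlt : l.toNat < diff.length := by rw [hlen]; omega
      rw [PySem.List.pyGetD_of_nonneg diff 0 h0l, PySem.List.pySetD_of_nonneg diff _ h0l]
      set diff1 := diff.set l.toNat (diff.getD l.toNat 0 + 1) with hdiff1
      have hlen1 : diff1.length = diff.length := by rw [hdiff1, List.length_set]
      have hrt : r.toNat < diff1.length := by rw [hlen1, hlen]; omega
      rw [PySem.List.pyGetD_of_nonneg diff1 0 h0r, PySem.List.pySetD_of_nonneg diff1 _ h0r]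
      rw [ih _ (by rw [List.length_set, hlen1, hlen])]
      rw [pv_sum_set diff1 r.toNat _ hrt, pv_sum_set diff l.toNat _ hlt]
      have hslo : lo.toNat ≤ (i : Nat) := by omega
      by_cases hcond : l ≤ (i : Int) ∧ (i : Int) < r
      · rw [if_pos (by omega), if_neg (by omega), hpvF, if_pos hcond]; ring
      · rw [hpvF, if_neg hcond]
        by_cases hli : l ≤ (i : Int)
        · rw [if_pos (by omega), if_pos (by omega)]; ring
        · rw [if_neg (by omega), if_neg (by omega)]; ring
    · rw [if_neg hlr, ih diff hlen, hpvF]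
      rw [if_neg (by omega)]
      ring

-- B's prefix-sum loop writes run + (window sum up to k) into each visited slot
theorem pv_runB (diff : List Int) (m : Nat) : ∀ (s : Nat) (cnt : List Int) (run : Int), s + m ≤ cnt.length →
    ((PySem.List.pyRange (s : Int) ((s : Int) + (m : Int)) 1).foldl
        (fun (st : List Int × Int) i =>
          (PySem.List.pySetD st.1 i (st.2 + PySem.List.pyGetD diff i 0), st.2 + PySem.List.pyGetD diff i 0))
        (cnt, run)).1
      = cnt.take s ++ (List.range' s m).map (fun k : Nat => run + pvS diff s (k + 1 - s)) ++ cnt.drop (s + m) := by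
  induction m with
  | zero =>
    intro s cnt run h
    simp [PySem.List.pyRange_one_eq_nil]
  | succ m ih =>
    intro s cnt run h
    have hcons : PySem.List.pyRange (s : Int) ((s : Int) + ((m : Int) + 1)) 1
        = (s : Int) :: PySem.List.pyRange ((s : Int) + 1) ((s : Int) + ((m : Int) + 1)) 1 :=
      PySem.List.pyRange_one_cons (by omega)
    push_cast
    push_cast at hcons
    rw [hcons, List.foldl_cons]
    simp only [PySem.List.pySetD_natCast, PySem.List.pyGetD_natCast]
    have hcast : ((s : Int) + 1) = ((s + 1 : Nat) : Int) := by push_cast; ring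
    have hcast2 : (s : Int) + ((m : Int) + 1) = ((s + 1 : Nat) : Int) + (m : Int) := by push_cast; ring
    rw [hcast, hcast2, ih (s + 1) (cnt.set s (run + diff.getD s 0)) (run + diff.getD s 0) (by simp; omega)]
    rw [List.range'_succ, List.map_cons]
    rw [pv_take_set _ _ _ (by omega), List.drop_set_of_lt (by omega)]
    have hmap : (List.range' (s+1) m).map (fun k : Nat => (run + diff.getD s 0) + pvS diff (s+1) (k + 1 - (s+1)))
        = (List.range' (s+1) m).map (fun k : Nat => run + pvS diff s (k + 1 - s)) := by
      apply List.map_congr_left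
      intro k hk
      have hks : s + 1 ≤ k := (List.mem_range'_1.mp hk).1
      have hsplit : pvS diff s (k + 1 - s) = diff.getD s 0 + pvS diff (s+1) (k - s) := by
        have : k + 1 - s = (k - s) + 1 := by omega
        rw [this, pvS, List.range'_succ, List.map_cons, List.sum_cons, ← pvS]
      rw [hsplit]
      have : k + 1 - (s + 1) = k - s := by omega
      rw [this]
      ring
    rw [hmap]
    have hfirst : run + pvS diff s (s + 1 - s) = run + diff.getD s 0 := by
      have : s + 1 - s = 1 := by omega
      rw [this]
      simp [pvS]
    have hdrop : s + 1 + m = s + (m + 1) := by omega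
    rw [hdrop, ← hfirst]
    simp

-- window sums over the all-zero diff array vanish
theorem pv_pvS_replicate (n s m : Nat) : pvS (List.replicate n (0 : Int)) s m = 0 := by
  apply List.sum_eq_zero
  intro x hx
  rcases List.mem_map.mp hx with ⟨k, _, rfl⟩
  simp [List.getD, List.getElem?_replicate]
  split <;> rfl

-- Int-bound wrapper around pv_outerA
theorem pv_outerA2 (sched : List (List Int)) (lo hi : Int) (h0 : 0 ≤ lo) (hle : lo ≤ hi)
    (count : List Int) (h : lo.toNat + (hi - lo).toNat ≤ count.length) :
    ((PySem.List.pyRange lo hi 1).foldl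
        (fun count i =>
          sched.foldl
            (fun count c =>
              if PySem.List.pyGetD c 0 0 ≤ i ∧ i < PySem.List.pyGetD c 1 0 then
                PySem.List.pySetD count i (PySem.List.pyGetD count i 0 + 1)
              else count)
            (PySem.List.pySetD count i 0))
        count)
      = count.take lo.toNat ++ (List.range' lo.toNat (hi - lo).toNat).map (fun k : Nat => pvF sched (k : Int))
          ++ count.drop (lo.toNat + (hi - lo).toNat) := by
  obtain ⟨m, hm⟩ : ∃ m : Nat, hi = lo + (m : Int) := ⟨(hi - lo).toNat, by omega⟩
  obtain ⟨a, ha⟩ : ∃ a : Nat, lo = (a : Int) := ⟨lo.toNat, by omega⟩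
  subst hm; subst ha
  have h1 : ((a : Int)).toNat = a := by omega
  have h2 : ((a : Int) + (m : Int) - (a : Int)).toNat = m := by omega
  rw [h1, h2] at *
  exact pv_outerA sched m a count (by omega)

-- Int-bound wrapper around pv_runB
theorem pv_runB2 (diff : List Int) (lo hi : Int) (h0 : 0 ≤ lo) (hle : lo ≤ hi)
    (cnt : List Int) (run : Int) (h : lo.toNat + (hi - lo).toNat ≤ cnt.length) :
    ((PySem.List.pyRange lo hi 1).foldl
        (fun (st : List Int × Int) i =>
          (PySem.List.pySetD st.1 i (st.2 + PySem.List.pyGetD diff i 0), st.2 + PySem.List.pyGetD diff i 0))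
        (cnt, run)).1
      = cnt.take lo.toNat ++ (List.range' lo.toNat (hi - lo).toNat).map (fun k : Nat => run + pvS diff lo.toNat (k + 1 - lo.toNat))
          ++ cnt.drop (lo.toNat + (hi - lo).toNat) := by
  obtain ⟨m, hm⟩ : ∃ m : Nat, hi = lo + (m : Int) := ⟨(hi - lo).toNat, by omega⟩
  obtain ⟨a, ha⟩ : ∃ a : Nat, lo = (a : Int) := ⟨lo.toNat, by omega⟩
  subst hm; subst ha
  have h1 : ((a : Int)).toNat = a := by omega
  have h2 : ((a : Int) + (m : Int) - (a : Int)).toNat = m := by omega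
  rw [h1, h2] at *
  exact pv_runB diff m a cnt run (by omega)

-- ===== VERDICT (by name: the statement is the Claim_ definition above) =====
theorem celebrityDensity_spec : Claim_equal_celebrityDensity := by
  intro sched start end_ _ hpre
  unfold Spec_celebrityDensity
  by_cases hse : start ≤ end_
  case neg =>
    -- empty time range: A's loop runs zero times, B takes its early-return branch
    simp only [celebrityDensity, celebrityDensity_alt]
    rw [PySem.List.pyRange_one_eq_nil (by omega), List.foldl_nil, if_pos (by omega)]
  case pos =>
    rcases hpre hse with ⟨hsum, _⟩
    have hend : 0 ≤ end_ := by omega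
    simp only [celebrityDensity, celebrityDensity_alt, PySem.List.pyRepeat_singleton]
    rw [if_neg (by omega)]
    set lo := max start 0 with hlo
    have h0lo : 0 ≤ lo := by omega
    have hloe : lo ≤ end_ := by omega
    -- A: split the time loop at lo; the wrapped negative phase only matters through the length
    rw [PySem.List.pyRange_one_append start lo (end_ + 1) (by omega) (by omega), List.foldl_append]
    rw [pv_outerA2 sched lo (end_ + 1) h0lo (by omega)]
    case h => rw [pv_lenA]; simp; omega
    -- B: prefix-sum loop over the clamped range
    rw [pv_runB2 _ lo (end_ + 1) h0lo (by omega)]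
    case h => simp; omega
    congr 1
    congr 1
    -- the untouched prefixes agree
    · by_cases hs : 0 ≤ start
      · rw [PySem.List.pyRange_one_eq_nil (by omega), List.foldl_nil]
      · rw [show lo.toNat = 0 by omega]
        simp
    -- the visited slots: window sums of the diff array are the densities
    · apply List.map_congr_left
      intro k hk
      rcases List.mem_range'_1.mp hk with ⟨hk1, hk2⟩
      have hd := pv_diffB sched lo end_ h0lo k (by omega) (by omega)
          (List.replicate (end_ + 2).toNat 0) (by simp)
      rw [hd, pv_pvS_replicate]
      ring
    -- past-the-end suffixes are both empty
    · rw [List.drop_eq_nil_of_le, List.drop_eq_nil_of_le]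
      · simp; omega
      · rw [pv_lenA]; simp; omega
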